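-- pv_equiv track=rewrite | github.com/SoslanGM/HxApy_Blender_import-export | hxapy_util.py | restore_faces
-- ===== SOURCE A (Python) =====
-- def restore_faces(references):
--     faces = []
--     tupl = []
--     for r in references:
--         if r < 0:
--             r = -r - 1
--             tupl.append(r)
--             faces.append(tuple(tupl))
--             tupl = []
--         else:
--             tupl.append(r)
--     return faces
-- ===== SOURCE B (Python) =====
-- def restore_faces(references):
--     # Two-phase: collect terminator positions first, then slice out each face.
--     bounds = [i for i, r in enumerate(references) if r < 0]
--     faces = []
--     start = 0
--     for b in bounds:
--         faces.append(tuple(references[start:b]) + (-references[b] - 1,))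
--         start = b + 1
--     return faces
-- ===== Notes on version B (the rewrite author's own statement) =====
-- stated objective: alternative
-- what changed: Replaces the append-and-flush accumulator loop by a two-phase pass: first collect the indices of all negative terminators, then build each face by slicing the segment before each terminator and appending the decoded terminator.
import Mathlib
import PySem

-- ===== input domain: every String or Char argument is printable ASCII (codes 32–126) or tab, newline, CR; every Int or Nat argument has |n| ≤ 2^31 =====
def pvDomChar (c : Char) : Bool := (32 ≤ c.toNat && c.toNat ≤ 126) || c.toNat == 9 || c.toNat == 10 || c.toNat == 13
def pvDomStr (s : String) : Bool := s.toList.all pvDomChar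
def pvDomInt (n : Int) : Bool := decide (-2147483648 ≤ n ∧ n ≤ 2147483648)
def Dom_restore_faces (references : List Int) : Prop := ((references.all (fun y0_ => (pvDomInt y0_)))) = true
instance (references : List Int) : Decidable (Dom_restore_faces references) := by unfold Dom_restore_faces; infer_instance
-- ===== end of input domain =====

-- ===== PORT A =====
-- B groups faces via a two-phase pass (terminator indices, then slices) instead of A's
-- append-and-flush accumulator; same O(n) cost, proved to return the same value.
def restore_faces (references : List Int) : List (List Int) :=
  (references.foldl
    (fun (s : List (List Int) × List Int) r =>
      if r < 0 then (s.1 ++ [s.2 ++ [-r - 1]], [])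
      else (s.1, s.2 ++ [r]))
    ([], [])).1

-- ===== PORT B =====
-- bounds = [i for i, r in enumerate(references) if r < 0]
def rf_bounds (references : List Int) : List Int :=
  (PySem.List.enumerate references 0).filterMap
    (fun p => if p.2 < 0 then some p.1 else none)

-- references[b] is always in range (b comes from enumerate), ported as pyGetD with default 0
def restore_faces_alt (references : List Int) : List (List Int) :=
  (rf_bounds references |>.foldl
    (fun (s : List (List Int) × Int) b =>
      (s.1 ++ [PySem.List.slice references (some s.2) (some b)
                 ++ [-(PySem.List.pyGetD references b 0) - 1]], b + 1))
    ([], 0)).1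

-- ===== PRECONDITION & SPEC =====
def Spec_restore_faces (references : List Int) (out : List (List Int)) : Prop := out = restore_faces_alt references
instance (references : List Int) (out : List (List Int)) : Decidable (Spec_restore_faces references out) := by unfold Spec_restore_faces; infer_instance

-- ===== CLAIM (what is proved, stated in full; the proofs are below) =====
def Claim_equal_restore_faces : Prop := ∀ (references : List Int), Dom_restore_faces references → Spec_restore_faces references (restore_faces references)

-- ===== LEMMAS AND PROOFS =====
def rf_boundsFrom (l : List Int) (j : Int) : List Int :=
  (PySem.List.enumerate l j).filterMap (fun p => if p.2 < 0 then some p.1 else none)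

theorem rf_boundsFrom_cons (r : Int) (rest : List Int) (j : Int) :
    rf_boundsFrom (r :: rest) j =
      (if r < 0 then [j] else []) ++ rf_boundsFrom rest (j + 1) := by
  simp [rf_boundsFrom, PySem.List.enumerate_cons, List.filterMap_cons]
  split_ifs <;> simp

theorem rf_main (refs : List Int) (l : List Int) (j start : Nat) (acc : List (List Int))
    (hs : start ≤ j) (hl : l = refs.drop j) :
    (l.foldl
      (fun (s : List (List Int) × List Int) r =>
        if r < 0 then (s.1 ++ [s.2 ++ [-r - 1]], [])
        else (s.1, s.2 ++ [r]))
      (acc, (refs.drop start).take (j - start))).1 =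
    ((rf_boundsFrom l (j : Int)).foldl
      (fun (s : List (List Int) × Int) b =>
        (s.1 ++ [PySem.List.slice refs (some s.2) (some b)
                   ++ [-(PySem.List.pyGetD refs b 0) - 1]], b + 1))
      (acc, (start : Int))).1 := by
  induction l generalizing j start acc with
  | nil => simp [rf_boundsFrom, PySem.List.enumerate]
  | cons r rest ih =>
    have hj : j < refs.length := by
      by_contra h
      have h0 : refs.drop j = [] := List.drop_eq_nil_of_le (by omega)
      rw [h0] at hl; exact List.cons_ne_nil _ _ hl
    have hget : refs[j]? = some r := by
      have h1 : (refs.drop j)[0]? = refs[j + 0]? := List.getElem?_drop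
      rw [← hl] at h1; simpa using h1.symm
    have hrest : rest = refs.drop (j + 1) := by
      have h1 : List.drop 1 (List.drop j refs) = List.drop (j + 1) refs := List.drop_drop
      rw [← hl] at h1; simpa using h1
    rw [rf_boundsFrom_cons]
    by_cases hneg : r < 0
    · simp only [List.foldl_cons, hneg, if_true, List.singleton_append]
      have hslice : PySem.List.slice refs (some (start : Int)) (some (j : Int)) =
          (refs.drop start).take (j - start) := by
        rw [PySem.List.slice_natCast]
      have hgd : PySem.List.pyGetD refs (j : Int) 0 = r := by
        rw [PySem.List.pyGetD_natCast]
        simp [hget]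
      have hcast : ((j : Int) + 1) = ((j + 1 : Nat) : Int) := by push_cast; ring
      rw [hslice, hgd, hcast]
      have := ih (j + 1) (j + 1) (acc ++ [(refs.drop start).take (j - start) ++ [-r - 1]])
        (le_refl _) hrest
      simpa using this
    · simp only [List.foldl_cons, hneg, if_false, List.nil_append]
      have htake : (refs.drop start).take (j - start) ++ [r] =
          (refs.drop start).take (j + 1 - start) := by
        have h1 : j + 1 - start = (j - start) + 1 := by omega
        rw [h1, List.take_add_one]
        congr 1
        have : (refs.drop start)[j - start]? = refs[start + (j - start)]? := by
          simp [List.getElem?_drop]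
        rw [this]
        have h2 : start + (j - start) = j := by omega
        rw [h2, hget]
        rfl
      rw [htake]
      have hcast : ((j : Int) + 1) = ((j + 1 : Nat) : Int) := by push_cast; ring
      rw [hcast]
      exact ih (j + 1) start acc (by omega) hrest

-- ===== VERDICT (by name: the statement is the Claim_ definition above) =====
theorem restore_faces_spec : Claim_equal_restore_faces := by
  intro references _
  unfold Spec_restore_faces restore_faces restore_faces_alt
  have h := rf_main references references 0 0 [] (le_refl _) (by simp)
  simpa [rf_bounds, rf_boundsFrom] using h
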